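-- pv_equiv track=rewrite | github.com/microcosmx/algorithms | algorithm-python/python_assemble/model.py | compare_multi_label
-- ===== SOURCE A (Python) =====
-- def compare_multi_label(x, y):
--     result_setted = False
--     result = False
--     targeted = False
--     if len(x) != len(y):
--         return False, targeted
--     for i in range(len(x)):
--         if x[i] == y[i] == 1:
--             targeted = True
--         if x[i] != y[i] and result_setted is False:
--             result_setted = True
--             result = False
--     if result_setted is False:
--         result = True
--     return result, targeted
-- ===== SOURCE B (Python) =====
-- def compare_multi_label(x, y):
--     if len(x) != len(y):
--         return False, False
--     ones_x = {i for i, v in enumerate(x) if v == 1}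
--     ones_y = {i for i, v in enumerate(y) if v == 1}
--     return x == y, bool(ones_x & ones_y)
-- ===== Notes on version B (the rewrite author's own statement) =====
-- stated objective: alternative
-- what changed: Replaces A's single stateful index loop (result_setted sentinel, three mutable flags) by whole-value list equality x == y for the first flag and, for the second, building the sets of positions holding 1 in each list and testing whether their intersection is nonempty.
import Mathlib
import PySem

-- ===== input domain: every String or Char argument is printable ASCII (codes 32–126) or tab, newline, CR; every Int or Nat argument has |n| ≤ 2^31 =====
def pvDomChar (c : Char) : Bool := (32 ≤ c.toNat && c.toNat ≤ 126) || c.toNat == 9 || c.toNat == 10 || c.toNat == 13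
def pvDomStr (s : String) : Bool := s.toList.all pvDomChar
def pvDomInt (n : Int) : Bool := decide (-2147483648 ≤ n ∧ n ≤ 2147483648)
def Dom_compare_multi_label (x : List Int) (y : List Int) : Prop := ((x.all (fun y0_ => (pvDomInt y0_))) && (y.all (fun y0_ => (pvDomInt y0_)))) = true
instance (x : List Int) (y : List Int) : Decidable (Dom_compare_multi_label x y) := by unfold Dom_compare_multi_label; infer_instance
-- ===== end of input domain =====

-- B replaces A's single stateful index loop (result_setted sentinel, three mutable flags)
-- by whole-list equality x == y for the first flag and, for the second, the sets of
-- positions holding 1 in each list intersected for nonemptiness; same O(n) cost, alternative.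


-- ===== PORT A =====
-- A's loop state (result_setted, result, targeted), stepped once per index i
def pvStepA (x y : List Int) (st : Bool × Bool × Bool) (i : Int) : Bool × Bool × Bool :=
  let t := if PySem.List.pyGetD x i 0 = PySem.List.pyGetD y i 0 ∧ PySem.List.pyGetD y i 0 = 1 then true else st.2.2
  if PySem.List.pyGetD x i 0 ≠ PySem.List.pyGetD y i 0 ∧ st.1 = false then (true, false, t)
  else (st.1, st.2.1, t)

def compare_multi_label (x : List Int) (y : List Int) : Bool × Bool :=
  if x.length ≠ y.length then (false, false)
  else
    let st := (PySem.List.pyRange 0 (x.length : Int) 1).foldl (pvStepA x y) (false, false, false)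
    (if st.1 = false then true else st.2.1, st.2.2)

-- ===== PORT B =====
-- set comprehension {i for i, v in enumerate(l) if v == 1}
def pvOnes (l : List Int) : PySem.Set Int :=
  PySem.Set.ofList ((PySem.List.enumerate l).filterMap (fun p => if p.2 == 1 then some p.1 else none))

def compare_multi_label_alt (x : List Int) (y : List Int) : Bool × Bool :=
  if x.length ≠ y.length then (false, false)
  else (x == y, !(PySem.Set.inter (pvOnes x) (pvOnes y)).isEmpty)

-- ===== PRECONDITION & SPEC =====
def Spec_compare_multi_label (x : List Int) (y : List Int) (out : Bool × Bool) : Prop := out = compare_multi_label_alt x y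
instance (x : List Int) (y : List Int) (out : Bool × Bool) : Decidable (Spec_compare_multi_label x y out) := by unfold Spec_compare_multi_label; infer_instance

-- ===== CLAIM (what is proved, stated in full; the proofs are below) =====
def Claim_equal_compare_multi_label : Prop := ∀ (x : List Int) (y : List Int), Dom_compare_multi_label x y → Spec_compare_multi_label x y (compare_multi_label x y)

-- ===== LEMMAS AND PROOFS =====

-- A's per-pair step on the zipped lists
def pvStepZ (st : Bool × Bool × Bool) (p : Int × Int) : Bool × Bool × Bool :=
  let t := if p.1 = p.2 ∧ p.2 = 1 then true else st.2.2
  if p.1 ≠ p.2 ∧ st.1 = false then (true, false, t) else (st.1, st.2.1, t)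

theorem pv_foldl_idx_zip (x : List Int) : ∀ (y : List Int) (st : Bool × Bool × Bool),
    x.length = y.length →
    (PySem.List.pyRange 0 (x.length : Int) 1).foldl (pvStepA x y) st = (x.zip y).foldl pvStepZ st := by
  induction x with
  | nil => intro y st h; simp [PySem.List.pyRange_one_eq_nil]
  | cons a x ih =>
    intro y st h
    cases y with
    | nil => simp at h
    | cons b y =>
      simp only [List.length_cons] at h ⊢
      have h' : x.length = y.length := by omega
      rw [PySem.List.pyRange_one_cons (by positivity)]
      have h2 : PySem.List.pyRange (0 + 1) ((x.length + 1 : Nat) : Int) 1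
          = (PySem.List.pyRange 0 (x.length : Int) 1).map (· + 1) := by
        rw [PySem.List.pyRange_one, PySem.List.pyRange_one]
        simp [List.map_map, Function.comp]
        intro k hk; ring
      simp only [List.foldl_cons, List.zip_cons_cons]
      rw [h2, List.foldl_map]
      have key : ∀ (st' : Bool × Bool × Bool),
          (PySem.List.pyRange 0 (x.length : Int) 1).foldl
            (fun acc k => pvStepA (a :: x) (b :: y) acc (k + 1)) st'
          = (PySem.List.pyRange 0 (x.length : Int) 1).foldl (pvStepA x y) st' := by
        intro st'
        apply PySem.List.foldl_congr_mem
        intro acc i hi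
        have hi' := (PySem.List.mem_pyRange_one).1 hi
        have e1 : PySem.List.pyGetD (a :: x) (i + 1) 0 = PySem.List.pyGetD x i 0 := by
          rw [PySem.List.pyGetD_eq_getElem _ _ (by omega) (by simp; omega),
              PySem.List.pyGetD_eq_getElem _ _ (by omega) (by exact_mod_cast hi'.2)]
          have : (i + 1).toNat = i.toNat + 1 := by omega
          simp [this]
        have e2 : PySem.List.pyGetD (b :: y) (i + 1) 0 = PySem.List.pyGetD y i 0 := by
          rw [PySem.List.pyGetD_eq_getElem _ _ (by omega) (by simp; omega),
              PySem.List.pyGetD_eq_getElem _ _ (by omega) (by rw [← h']; exact_mod_cast hi'.2)]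
          have : (i + 1).toNat = i.toNat + 1 := by omega
          simp [this]
        simp [pvStepA, e1, e2]
      rw [key]
      have estep : pvStepA (a :: x) (b :: y) st 0 = pvStepZ st (a, b) := by
        simp [pvStepA, pvStepZ, PySem.List.pyGetD_zero_cons]
      rw [estep, ih y _ h']

theorem pv_loop_spec (l : List (Int × Int)) : ∀ (rs r t : Bool),
    l.foldl pvStepZ (rs, r, t)
      = (rs || l.any (fun p => !(p.1 == p.2)),
         r && (rs || l.all (fun p => p.1 == p.2)),
         t || l.any (fun p => p.1 == p.2 && p.2 == 1)) := by
  induction l with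
  | nil => intro rs r t; simp
  | cons p l ih =>
    intro rs r t
    simp only [List.foldl_cons, List.any_cons, List.all_cons, pvStepZ]
    by_cases h1 : p.1 = p.2 ∧ p.2 = 1 <;> by_cases h2 : p.1 ≠ p.2 ∧ rs = false <;>
      simp [h1, h2, ih] <;>
      (try cases rs) <;> (try cases r) <;> (try cases t) <;> simp_all

theorem pv_mem_ones (l : List Int) (a : Int) :
    a ∈ pvOnes l ↔ ∃ (k : Nat) (h : k < l.length), l[k] = 1 ∧ a = (k : Int) := by
  unfold pvOnes
  rw [PySem.Set.mem_ofList, List.mem_filterMap]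
  constructor
  · rintro ⟨p, hp, he⟩
    obtain ⟨k, hk, rfl⟩ := (PySem.List.mem_enumerate_iff _ _ _).1 hp
    by_cases h1 : l[k] == 1 <;> simp [h1] at he
    exact ⟨k, hk, by simpa using h1, by omega⟩
  · rintro ⟨k, hk, h1, rfl⟩
    exact ⟨((k : Int), l[k]), (PySem.List.mem_enumerate_iff _ _ _).2 ⟨k, hk, by simp⟩, by simp [h1]⟩

theorem pv_zip_any_iff (x y : List Int) :
    ((x.zip y).any (fun p => p.1 == p.2 && p.2 == 1)) = true ↔
      ∃ (k : Nat) (h1 : k < x.length) (h2 : k < y.length), x[k] = 1 ∧ y[k] = 1 := by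
  rw [List.any_eq_true]
  constructor
  · rintro ⟨p, hp, hpr⟩
    obtain ⟨k, hk, rfl⟩ := List.mem_iff_getElem.1 hp
    have hk' := hk; rw [List.length_zip] at hk'
    rw [List.getElem_zip] at hpr
    simp at hpr
    exact ⟨k, by omega, by omega, by omega, by omega⟩
  · rintro ⟨k, h1, h2, hx, hy⟩
    refine ⟨(x[k], y[k]), ?_, by simp [hx, hy]⟩
    have hk : k < (x.zip y).length := by rw [List.length_zip]; omega
    exact List.mem_iff_getElem.2 ⟨k, hk, by rw [List.getElem_zip]⟩

theorem pv_targeted_eq (x y : List Int) :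
    ((x.zip y).any (fun p => p.1 == p.2 && p.2 == 1))
      = !(PySem.Set.inter (pvOnes x) (pvOnes y)).isEmpty := by
  rw [Bool.eq_iff_iff, pv_zip_any_iff]
  rw [Bool.not_eq_eq_eq_not, Bool.not_true, List.isEmpty_eq_false_iff_exists_mem]
  constructor
  · rintro ⟨k, h1, h2, hx, hy⟩
    refine ⟨(k : Int), (PySem.Set.mem_inter _ _ _).2 ⟨?_, ?_⟩⟩
    · exact (pv_mem_ones x _).2 ⟨k, h1, hx, rfl⟩
    · exact (pv_mem_ones y _).2 ⟨k, h2, hy, rfl⟩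
  · rintro ⟨a, ha⟩
    obtain ⟨hax, hay⟩ := (PySem.Set.mem_inter _ _ _).1 ha
    obtain ⟨k, hk, hx1, rfl⟩ := (pv_mem_ones x _).1 hax
    obtain ⟨k', hk', hy1, hkk⟩ := (pv_mem_ones y _).1 hay
    have hkeq : k' = k := by omega
    subst hkeq
    exact ⟨k', hk, hk', hx1, hy1⟩

theorem pv_result_eq (x y : List Int) (h : x.length = y.length) :
    ((x.zip y).all (fun p => p.1 == p.2)) = (x == y) := by
  rw [Bool.eq_iff_iff, List.all_eq_true, beq_iff_eq]
  constructor
  · intro hall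
    apply List.ext_getElem h
    intro k hk hk'
    have hkz : k < (x.zip y).length := by rw [List.length_zip]; omega
    have := hall _ (List.mem_iff_getElem.2 ⟨k, hkz, rfl⟩)
    rw [List.getElem_zip] at this
    simpa using this
  · rintro rfl p hp
    obtain ⟨k, hk, rfl⟩ := List.mem_iff_getElem.1 hp
    rw [List.getElem_zip]; simp

-- ===== VERDICT (by name: the statement is the Claim_ definition above) =====
theorem compare_multi_label_spec : Claim_equal_compare_multi_label := by
  intro x y _
  unfold Spec_compare_multi_label compare_multi_label compare_multi_label_alt
  by_cases h : x.length = y.length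
  · simp only [h, ne_eq, not_true_eq_false, if_false]
    rw [← h, pv_foldl_idx_zip x y _ h, pv_loop_spec]
    simp only [Bool.false_or, Bool.false_and]
    rw [show ((x.zip y).any fun p => !(p.1 == p.2)) = !(x.zip y).all fun p => p.1 == p.2 from
      List.not_all_eq_any_not.symm]
    rw [pv_targeted_eq, ← pv_result_eq x y h]
    cases (x.zip y).all fun p => p.1 == p.2 <;> simp
  · simp [h]
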